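-- pv_equiv track=rewrite | github.com/yashwanth-yasp/DSA | Problems/Array_and_Hashing/no_repeating_digits_in_range.py | has_no_repeating_digits
-- ===== SOURCE A (Python) =====
-- def has_no_repeating_digits(num):
--
--     if num < 0:
--         return False
--
--     seen = 0
--     while num > 0:
--         digit = num % 10
--         if seen & (1 << digit):
--             return False
--         seen |= 1 << digit
--         num //= 10
--     return True
-- ===== SOURCE B (Python) =====
-- def has_no_repeating_digits(num):
--     if num < 0:
--         return False
--     s = str(num)
--     return len(set(s)) == len(s)
-- ===== Notes on version B (the rewrite author's own statement) =====
-- stated objective: simpler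
-- what changed: B renders the number as its decimal string once and compares the count of distinct digit characters with the string length, replacing A's digit-by-digit modulo loop with a bitmask accumulator and early return.
import Mathlib
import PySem

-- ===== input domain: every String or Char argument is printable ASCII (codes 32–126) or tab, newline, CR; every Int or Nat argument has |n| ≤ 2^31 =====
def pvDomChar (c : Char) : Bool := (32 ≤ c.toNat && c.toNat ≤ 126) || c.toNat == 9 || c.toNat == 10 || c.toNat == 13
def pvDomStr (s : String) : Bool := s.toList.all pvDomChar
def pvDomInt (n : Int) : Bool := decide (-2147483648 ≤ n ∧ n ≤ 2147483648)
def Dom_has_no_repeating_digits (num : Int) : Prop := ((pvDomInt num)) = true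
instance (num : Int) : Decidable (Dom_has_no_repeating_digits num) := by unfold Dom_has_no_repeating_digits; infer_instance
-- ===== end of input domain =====

-- B replaces A's modulo/bitmask loop by a one-shot distinct-count on the decimal string (objective: simpler).

-- ===== PORT A =====
-- A's while loop; it runs with num > 0 and seen ≥ 0 throughout, where Python's
-- %, //, &, |, << coincide with these ℕ operations (exact on the admitted inputs).
def hnrLoop (seen num : Nat) : Bool :=
  if h : num = 0 then true          -- while num > 0
  else if seen &&& (1 <<< (num % 10)) != 0 then false   -- digit = num % 10
  else hnrLoop (seen ||| (1 <<< (num % 10))) (num / 10)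
termination_by num
decreasing_by exact Nat.div_lt_self (Nat.pos_of_ne_zero h) (by norm_num)

def has_no_repeating_digits (num : Int) : Bool :=
  if num < 0 then false else hnrLoop 0 num.toNat

-- ===== PORT B =====
def has_no_repeating_digits_alt (num : Int) : Bool :=
  if num < 0 then false
  else
    let s := PySem.Int.toChars num            -- s = str(num)
    (PySem.Set.ofList s).length == s.length   -- len(set(s)) == len(s)

-- ===== PRECONDITION & SPEC =====
def Spec_has_no_repeating_digits (num : Int) (out : Bool) : Prop := out = has_no_repeating_digits_alt num
instance (num : Int) (out : Bool) : Decidable (Spec_has_no_repeating_digits num out) := by unfold Spec_has_no_repeating_digits; infer_instance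

-- ===== CLAIM (what is proved, stated in full; the proofs are below) =====
def Claim_equal_has_no_repeating_digits : Prop := ∀ (num : Int), Dom_has_no_repeating_digits num → Spec_has_no_repeating_digits num (has_no_repeating_digits num)

-- ===== LEMMAS AND PROOFS =====

-- The abstract loop over a list of digits (least-significant first).
def goDigits (seen : Nat) : List Nat → Bool
  | [] => true
  | d :: ds => if seen &&& (1 <<< d) != 0 then false else goDigits (seen ||| (1 <<< d)) ds

theorem hnrLoop_eq_goDigits (n : Nat) : ∀ seen, hnrLoop seen n = goDigits seen (Nat.digits 10 n) := by
  induction n using Nat.strong_induction_on with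
  | _ n ih =>
    intro seen
    by_cases h : n = 0
    · subst h; simp [hnrLoop, goDigits]
    · rw [hnrLoop, dif_neg h, Nat.digits_def' (by norm_num : 1 < 10) (Nat.pos_of_ne_zero h),
        goDigits]
      split
      · rfl
      · exact ih (n / 10) (Nat.div_lt_self (Nat.pos_of_ne_zero h) (by norm_num)) _

theorem goDigits_iff (ds : List Nat) : ∀ seen,
    goDigits seen ds = true ↔ ds.Nodup ∧ ∀ d ∈ ds, seen.testBit d = false := by
  induction ds with
  | nil => intro seen; simp [goDigits]
  | cons d ds ih =>
    intro seen
    have h1 : (1 <<< d : Nat) = 2 ^ d := by simp [Nat.shiftLeft_eq]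
    have hand : (seen &&& (1 <<< d) != 0) = seen.testBit d := by
      rw [h1, Nat.and_two_pow]
      cases hb : seen.testBit d <;> simp
    rw [goDigits, hand]
    cases hb : seen.testBit d with
    | true =>
      constructor
      · intro hF; exact absurd hF (by simp)
      · rintro ⟨-, hall⟩
        exact absurd (hall d (List.mem_cons_self)) (by simp [hb])
    | false =>
      rw [if_neg (by simp), ih]
      constructor
      · rintro ⟨hnd, hall⟩
        refine ⟨List.nodup_cons.mpr ⟨fun hmem => ?_, hnd⟩, ?_⟩
        · have := hall d hmem
          rw [Nat.testBit_or, h1, Nat.testBit_two_pow_self] at this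
          simp at this
        · intro e he
          rcases List.mem_cons.mp he with rfl | he'
          · exact hb
          · have := hall e he'
            rw [Nat.testBit_or] at this
            exact (Bool.or_eq_false_iff.mp this).1
      · rintro ⟨hnd, hall⟩
        have hd : d ∉ ds := (List.nodup_cons.mp hnd).1
        refine ⟨(List.nodup_cons.mp hnd).2, fun e he => ?_⟩
        rw [Nat.testBit_or, hall e (List.mem_cons_of_mem _ he), h1,
          Nat.testBit_two_pow_of_ne (fun hde => hd (by rw [hde]; exact he))]
        rfl

-- PySem.Set.ofList is a sublist of the input (built with an empty accumulator).
theorem foldl_add_sublist {α : Type} [BEq α] (xs : List α) :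
    ∀ s : List α, ∃ t, List.foldl PySem.Set.add s xs = s ++ t ∧ t.Sublist xs := by
  induction xs with
  | nil => intro s; exact ⟨[], by simp, List.Sublist.refl _⟩
  | cons x xs ih =>
    intro s
    rw [List.foldl_cons]
    by_cases hc : PySem.Set.contains s x = true
    · have hadd : PySem.Set.add s x = s := by unfold PySem.Set.add; rw [if_pos hc]
      rw [hadd]
      obtain ⟨t, ht, hsub⟩ := ih s
      exact ⟨t, ht, hsub.cons x⟩
    · have hadd : PySem.Set.add s x = s ++ [x] := by unfold PySem.Set.add; rw [if_neg hc]
      rw [hadd]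
      obtain ⟨t, ht, hsub⟩ := ih (s ++ [x])
      exact ⟨x :: t, by simpa using ht, hsub.cons₂ x⟩

theorem foldl_add_of_nodup {α : Type} [BEq α] [LawfulBEq α] (xs : List α) :
    ∀ s : List α, (s ++ xs).Nodup → List.foldl PySem.Set.add s xs = s ++ xs := by
  induction xs with
  | nil => intro s _; simp
  | cons x xs ih =>
    intro s hnd
    have hx : x ∉ s := by
      intro hmem
      have := List.disjoint_of_nodup_append hnd
      exact this hmem (List.mem_cons_self)
    have hadd : PySem.Set.add s x = s ++ [x] := by
      unfold PySem.Set.add; rw [if_neg (by simp [PySem.Set.contains, hx])]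
    rw [List.foldl_cons, hadd]
    have := ih (s ++ [x]) (by simpa using hnd)
    simpa using this

theorem ofList_len_iff {α : Type} [BEq α] [LawfulBEq α] (xs : List α) :
    ((PySem.Set.ofList xs).length == xs.length) = true ↔ xs.Nodup := by
  constructor
  · intro h
    obtain ⟨t, ht, hsub⟩ := foldl_add_sublist xs []
    have hlen : t.length = xs.length := by
      have := beq_iff_eq.mp h
      rw [PySem.Set.ofList, PySem.Set.empty] at this
      simpa [ht] using this
    have : t = xs := hsub.eq_of_length hlen
    have hnd := PySem.Set.nodup_ofList xs
    rw [PySem.Set.ofList, PySem.Set.empty] at hnd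
    rw [ht, this] at hnd
    simpa using hnd
  · intro h
    have := foldl_add_of_nodup xs [] (by simpa using h)
    rw [PySem.Set.ofList, PySem.Set.empty, this]
    simp

-- str(n) for n > 0 is the reversed digit list rendered with Nat.digitChar.
theorem toDigitsCore_eq (f : Nat) : ∀ n acc, 0 < n → n ≤ f →
    Nat.toDigitsCore 10 f n acc = ((Nat.digits 10 n).map Nat.digitChar).reverse ++ acc := by
  induction f with
  | zero => intro n acc hn hf; omega
  | succ f ih =>
    intro n acc hn hf
    rw [Nat.toDigitsCore]
    by_cases h : n / 10 = 0
    · have hlt : n < 10 := by omega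
      rw [if_pos h, Nat.digits_of_lt 10 n (by omega) hlt]
      simp [Nat.mod_eq_of_lt hlt]
    · rw [if_neg h, ih (n / 10) _ (Nat.pos_of_ne_zero h) (by omega),
        Nat.digits_def' (by norm_num : 1 < 10) hn]
      simp

theorem digitChar_inj (d e : Nat) (hd : d < 10) (he : e < 10)
    (h : Nat.digitChar d = Nat.digitChar e) : d = e := by
  interval_cases d <;> interval_cases e <;> simp_all [Nat.digitChar]

theorem toChars_nodup_iff (n : Nat) (hn : 0 < n) :
    (PySem.Int.toChars (n : Int)).Nodup ↔ (Nat.digits 10 n).Nodup := by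
  have hpos : ¬ ((n : Int) < 0) := by omega
  rw [PySem.Int.toChars, if_neg hpos]
  have : (n : Int).toNat = n := Int.toNat_natCast n
  rw [this, Nat.toDigits, toDigitsCore_eq (n + 1) n [] hn (by omega)]
  rw [List.append_nil, List.nodup_reverse]
  constructor
  · exact fun h => h.of_map _
  · intro h
    exact h.map_on (fun x hx y hy hxy =>
      digitChar_inj x y (Nat.digits_lt_base (by norm_num) hx) (Nat.digits_lt_base (by norm_num) hy) hxy)

-- ===== VERDICT (by name: the statement is the Claim_ definition above) =====
theorem has_no_repeating_digits_spec : Claim_equal_has_no_repeating_digits := by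
  intro num _
  unfold Spec_has_no_repeating_digits has_no_repeating_digits has_no_repeating_digits_alt
  by_cases hneg : num < 0
  · simp [hneg]
  · rw [if_neg hneg, if_neg hneg]
    by_cases h0 : num = 0
    · subst h0
      rw [show (0 : Int).toNat = 0 from rfl, hnrLoop]
      simp [PySem.Int.toChars, Nat.toDigits, Nat.toDigitsCore, PySem.Set.ofList,
        PySem.Set.add, PySem.Set.empty]
    · have hn : 0 < num.toNat := by omega
      have hrepr : num = ((num.toNat : Nat) : Int) := by omega
      rw [Bool.eq_iff_iff, hnrLoop_eq_goDigits, goDigits_iff]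
      have hs : (PySem.Int.toChars num).Nodup ↔ (Nat.digits 10 num.toNat).Nodup := by
        rw [hrepr]; exact toChars_nodup_iff num.toNat hn
      rw [ofList_len_iff]
      constructor
      · rintro ⟨hnd, -⟩; exact hs.mpr hnd
      · intro hnd
        exact ⟨hs.mp hnd, fun d _ => Nat.zero_testBit d⟩
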